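-- pv_equiv track=rewrite | github.com/abinjakob/nEEGlace | readwriteConfig.py | updateFile
-- ===== SOURCE A (Python) =====
-- def updateFile(filedata):
--     # initialise empty list
--     newdata = []
--     # reading each line
--     for line in filedata.split('\n'):
--         # checking if line starts with 'threshold'
--         if line.startswith('threshold'):
--             # adding new line wih the new content
--             newdata.append('threshold 45')
--         else:
--             # appended the line without any change
--             newdata.append(line)
--     # returning the list seperated by newline
--     return '\n'.join(newdata)
-- ===== SOURCE B (Python) =====
-- def updateFile(filedata):
--     # Single index-based scan: at each line start, either emit the replacement and
--     # skip to the next newline, or copy the line slice verbatim; no split/join of lines.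
--     out = []
--     i = 0
--     n = len(filedata)
--     while i < n:
--         j = filedata.find('\n', i)
--         end = n if j == -1 else j
--         if filedata.startswith('threshold', i):
--             out.append('threshold 45')
--         else:
--             out.append(filedata[i:end])
--         i = end
--         if i < n:
--             out.append('\n')
--             i += 1
--     return ''.join(out)
-- ===== Notes on version B (the rewrite author's own statement) =====
-- stated objective: alternative
-- what changed: Replaced the split-into-lines/per-line-list/append/join pipeline with a single index-based scan that locates each line break with str.find and either copies the line slice or emits the replacement, building the output without ever materialising the list of lines.
import Mathlib
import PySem

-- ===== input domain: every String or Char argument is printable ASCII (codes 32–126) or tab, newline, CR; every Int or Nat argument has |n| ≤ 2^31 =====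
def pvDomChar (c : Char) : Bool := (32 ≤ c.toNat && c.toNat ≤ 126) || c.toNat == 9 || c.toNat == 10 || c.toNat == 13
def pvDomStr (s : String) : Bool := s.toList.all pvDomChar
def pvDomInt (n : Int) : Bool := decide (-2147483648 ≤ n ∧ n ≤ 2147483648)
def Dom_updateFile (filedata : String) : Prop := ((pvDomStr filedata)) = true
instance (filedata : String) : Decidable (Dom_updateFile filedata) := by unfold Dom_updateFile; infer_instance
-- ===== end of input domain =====

-- B replaces A's split('\n')/per-line list/join pipeline with a single index-based scan
-- over the character stream (objective: alternative, same O(n) cost).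

-- ===== PORT A =====
-- A: split on '\n', append a (possibly replaced) entry per line to a list, join with '\n'.
def updateFile (filedata : String) : String :=
  let newdata : List (List Char) :=
    (PySem.Chars.splitOn filedata.toList ['\n']).foldl
      (fun acc line =>
        if PySem.Chars.startswith line "threshold".toList then acc ++ ["threshold 45".toList]
        else acc ++ [line]) []
  String.ofList (PySem.Chars.join ['\n'] newdata)

-- ===== PORT B =====
-- chars from the first '\n' on (inclusive), [] if none — Source B's `j = filedata.find('\n', i)` cursor move
def pvDropLine : List Char → List Char
  | [] => []
  | c :: cs => if c = '\n' then c :: cs else pvDropLine cs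

-- chars of the current line (up to, excluding, the first '\n') — Source B's slice filedata[i:end]
def pvTakeLine : List Char → List Char
  | [] => []
  | c :: cs => if c = '\n' then [] else c :: pvTakeLine cs

theorem pvDropLine_length_le (cs : List Char) : (pvDropLine cs).length ≤ cs.length := by
  induction cs with
  | nil => simp [pvDropLine]
  | cons c cs ih =>
    simp only [pvDropLine]
    split
    · simp
    · exact Nat.le_succ_of_le ih

-- Source B's while loop: one step per line, emitting the replacement or the line slice, then '\n'
def pvGo : List Char → List Char
  | [] => []
  | c :: cs =>
    let line := if "threshold".toList.isPrefixOf (c :: cs) then "threshold 45".toList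
                else pvTakeLine (c :: cs)
    match h : pvDropLine (c :: cs) with
    | [] => line
    | _ :: rs => line ++ '\n' :: pvGo rs
termination_by cs => cs.length
decreasing_by
  have := pvDropLine_length_le (c :: cs)
  rw [h] at this
  simpa using this

def updateFile_alt (filedata : String) : String :=
  String.ofList (pvGo filedata.toList)

-- ===== PRECONDITION & SPEC =====
def Spec_updateFile (filedata : String) (out : String) : Prop := out = updateFile_alt filedata
instance (filedata : String) (out : String) : Decidable (Spec_updateFile filedata out) := by unfold Spec_updateFile; infer_instance

-- ===== CLAIM (what is proved, stated in full; the proofs are below) =====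
def Claim_equal_updateFile : Prop := ∀ (filedata : String), Dom_updateFile filedata → Spec_updateFile filedata (updateFile filedata)

-- ===== LEMMAS AND PROOFS =====

-- the list of lines of cs, split on '\n' Python-style (empty input has one empty line)
def pvLines : List Char → List (List Char)
  | [] => [[]]
  | c :: cs => if c = '\n' then [] :: pvLines cs
               else (c :: (pvLines cs).headI) :: (pvLines cs).tail

theorem pvLines_ne_nil (cs : List Char) : pvLines cs ≠ [] := by
  cases cs with
  | nil => simp [pvLines]
  | cons c cs => simp only [pvLines]; split <;> simp

-- invariant form of splitOn's accumulator loop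
def pvAux : List Char → List Char → List (List Char)
  | [], cur => [cur.reverse]
  | c :: t, cur => if c = '\n' then cur.reverse :: pvAux t [] else pvAux t (c :: cur)

theorem pvGoSpec (fuel : Nat) (cs cur : List Char) (acc : List (List Char))
    (h : cs.length < fuel) :
    PySem.Chars.splitOn.go ['\n'] fuel cs cur acc = acc.reverse ++ pvAux cs cur := by
  induction fuel generalizing cs cur acc with
  | zero => omega
  | succ fuel ih =>
    cases cs with
    | nil =>
      rw [PySem.Chars.splitOn.go]
      simp [pvAux]
      omega
    | cons c rest =>
      rw [PySem.Chars.splitOn.go]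
      by_cases hc : c = '\n'
      · subst hc
        have hpre : (['\n'] : List Char).isPrefixOf ('\n' :: rest) = true := by
          simp [List.isPrefixOf]
        rw [if_pos hpre]
        have hd : List.drop (['\n'] : List Char).length ('\n' :: rest) = rest := rfl
        rw [hd, ih rest [] _ (by simp at h; omega)]
        simp [pvAux]
      · have hpre : (['\n'] : List Char).isPrefixOf (c :: rest) = false := by
          simp only [List.isPrefixOf, List.isPrefixOf_nil_left, Bool.and_true,
            beq_eq_false_iff_ne, ne_eq]
          exact fun hh => hc hh.symm
        rw [hpre]
        simp only [Bool.false_eq_true, if_false]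
        rw [ih rest (c :: cur) acc (by simp at h; omega)]
        simp [pvAux, hc]

theorem pvAux_eq (cs cur : List Char) :
    pvAux cs cur = (cur.reverse ++ (pvLines cs).headI) :: (pvLines cs).tail := by
  induction cs generalizing cur with
  | nil => simp [pvAux, pvLines]
  | cons c t ih =>
    simp only [pvAux, pvLines]
    by_cases hc : c = '\n'
    · simp only [if_pos hc, ih]
      cases hpl : pvLines t with
      | nil => exact absurd hpl (pvLines_ne_nil t)
      | cons a as => simp
    · simp only [if_neg hc, ih]
      simp

theorem splitOn_eq_pvLines (cs : List Char) :
    PySem.Chars.splitOn cs ['\n'] = pvLines cs := by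
  show PySem.Chars.splitOn.go ['\n'] (cs.length + 1) cs [] [] = _
  rw [pvGoSpec _ _ _ _ (by omega), pvAux_eq]
  cases h : pvLines cs with
  | nil => exact absurd h (pvLines_ne_nil cs)
  | cons a t => simp

theorem pvDropLine_cases (cs : List Char) :
    pvDropLine cs = [] ∨ ∃ rs, pvDropLine cs = '\n' :: rs := by
  induction cs with
  | nil => left; rfl
  | cons c t ih =>
    simp only [pvDropLine]
    by_cases hc : c = '\n'
    · right; exact ⟨t, by simp [hc]⟩
    · simpa [hc] using ih

theorem pvLines_of_dropLine_nil (cs : List Char) (h : pvDropLine cs = []) :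
    pvLines cs = [pvTakeLine cs] := by
  induction cs with
  | nil => rfl
  | cons c t ih =>
    simp only [pvDropLine] at h
    by_cases hc : c = '\n'
    · simp [hc] at h
    · simp only [if_neg hc] at h
      simp [pvLines, pvTakeLine, hc, ih h]

theorem pvLines_of_dropLine_cons (cs rs : List Char) (h : pvDropLine cs = '\n' :: rs) :
    pvLines cs = pvTakeLine cs :: pvLines rs := by
  induction cs with
  | nil => simp [pvDropLine] at h
  | cons c t ih =>
    simp only [pvDropLine] at h
    by_cases hc : c = '\n'
    · simp only [if_pos hc] at h
      obtain ⟨rfl⟩ : t = rs := by injection h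
      simp [pvLines, pvTakeLine, hc]
    · simp only [if_neg hc] at h
      simp [pvLines, pvTakeLine, hc, ih h]

theorem isPrefixOf_takeLine (p cs : List Char) (hp : '\n' ∉ p) :
    p.isPrefixOf cs = p.isPrefixOf (pvTakeLine cs) := by
  induction p generalizing cs with
  | nil => simp [List.isPrefixOf]
  | cons a p ih =>
    have ha : a ≠ '\n' := fun h => hp (h ▸ List.mem_cons_self)
    cases cs with
    | nil => rfl
    | cons c t =>
      simp only [pvTakeLine]
      by_cases hc : c = '\n'
      · subst hc
        simp [List.isPrefixOf, ha]
      · simp only [if_neg hc, List.isPrefixOf]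
        rw [ih t (fun h => hp (List.mem_cons_of_mem _ h))]

-- A's per-line transformation
def pvF (line : List Char) : List Char :=
  if "threshold".toList.isPrefixOf line then "threshold 45".toList else line

theorem pvThr_no_nl : '\n' ∉ "threshold".toList := by decide

theorem pvGo_drop_nil (c : Char) (cs : List Char) (h : pvDropLine (c :: cs) = []) :
    pvGo (c :: cs) = (if "threshold".toList.isPrefixOf (c :: cs) then "threshold 45".toList
      else pvTakeLine (c :: cs)) := by
  simp only [pvGo]
  split
  · rfl
  · next heq => rw [h] at heq; cases heq

theorem pvGo_drop_cons' (c d : Char) (cs rs : List Char) (h : pvDropLine (c :: cs) = d :: rs) :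
    pvGo (c :: cs) = (if "threshold".toList.isPrefixOf (c :: cs) then "threshold 45".toList
      else pvTakeLine (c :: cs)) ++ '\n' :: pvGo rs := by
  simp only [pvGo]
  split
  · next heq => rw [h] at heq; cases heq
  · next heq =>
      rw [h] at heq
      injection heq with h1 h2
      rw [h2]

theorem join_map_lines_eq_pvGo (cs : List Char) :
    PySem.Chars.join ['\n'] ((pvLines cs).map pvF) = pvGo cs := by
  induction cs using pvGo.induct with
  | case1 => simp [pvLines, pvF, PySem.Chars.join_singleton, pvGo]
  | case2 c cs h =>
    rw [pvLines_of_dropLine_nil _ h, pvGo_drop_nil c cs h]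
    simp only [List.map_cons, List.map_nil, PySem.Chars.join_singleton]
    simp only [pvF, isPrefixOf_takeLine _ (c :: cs) pvThr_no_nl]
  | case3 c cs x rs h ih =>
    obtain h2 | ⟨rs2, h2⟩ := pvDropLine_cases (c :: cs)
    · rw [h] at h2; cases h2
    · rw [h] at h2
      injection h2 with hx hrs
      subst hx hrs
      rw [pvLines_of_dropLine_cons _ _ h, pvGo_drop_cons' _ _ _ _ h]
      have hne : pvLines rs ≠ [] := pvLines_ne_nil rs
      obtain ⟨b, bs, hb⟩ : ∃ b bs, pvLines rs = b :: bs := by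
        cases hpl : pvLines rs with
        | nil => exact absurd hpl hne
        | cons b bs => exact ⟨b, bs, rfl⟩
      rw [hb] at ih ⊢
      simp only [List.map_cons] at ih
      simp only [List.map_cons, PySem.Chars.join_cons_cons]
      rw [ih]
      simp only [pvF, isPrefixOf_takeLine _ (c :: cs) pvThr_no_nl, List.append_assoc,
        List.singleton_append]

theorem foldl_eq_map (ls : List (List Char)) :
    ls.foldl (fun acc line =>
        if PySem.Chars.startswith line "threshold".toList then acc ++ ["threshold 45".toList]
        else acc ++ [line]) [] = ls.map pvF := by
  have hfn : (fun (acc : List (List Char)) line =>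
        if PySem.Chars.startswith line "threshold".toList then acc ++ ["threshold 45".toList]
        else acc ++ [line]) = fun acc line => acc ++ [pvF line] := by
    funext acc line
    simp only [pvF, PySem.Chars.startswith]
    split <;> rfl
  rw [hfn, PySem.List.foldl_append_singleton_eq_map]
  simp

-- ===== VERDICT (by name: the statement is the Claim_ definition above) =====
theorem updateFile_spec : Claim_equal_updateFile := by
  intro filedata _
  show updateFile filedata = updateFile_alt filedata
  unfold updateFile updateFile_alt
  rw [foldl_eq_map, splitOn_eq_pvLines]
  simp only [join_map_lines_eq_pvGo]
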